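-- pv_equiv track=rewrite | github.com/mlcommons/hpc_results_v1.0 | HelmholtzAI/benchmarks/implementations/image-src/data/stage_hdf5_data.py | get_shard_range
-- ===== SOURCE A (Python) =====
-- def get_shard_range(num_files, num_shards, shard_id, cycle_dist=0):
--     assert (shard_id < num_shards)
--     # shard files into bulk and remainder:
--     num_files_per_shard = num_files // num_shards
--     # num_files_bulk = num_files_per_shard * num_shards
--     num_files_remainder = num_files % num_shards
--
--     shard_start = [0]
--     for i in range(1, num_shards):
--         if i - 1 < num_files_remainder:
--             this_shard_start = shard_start[-1] + (num_files_per_shard + 1)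
--         else:
--             this_shard_start = shard_start[-1] + (num_files_per_shard)
--         shard_start.append(this_shard_start)
--     shard_start.append(num_files)
--
--     ranges = []
--     for i in range(num_shards):
--         ranges.append((shard_start[i], shard_start[i + 1]))
--     return ranges[shard_id]
-- ===== SOURCE B (Python) =====
-- def get_shard_range(num_files, num_shards, shard_id, cycle_dist=0):
--     assert (shard_id < num_shards)
--     # closed form: boundary of shard i is i*per + min(i, rem)
--     per, rem = divmod(num_files, num_shards)
--     i = shard_id % num_shards  # Python list indexing wraps negative ids
--     start = i * per + min(i, rem)
--     end = start + per + (1 if i < rem else 0)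
--     return (start, end)
-- ===== Notes on version B (the rewrite author's own statement) =====
-- stated objective: faster
-- what changed: B replaces A's loop that builds all num_shards+1 shard boundaries and the full list of ranges by the O(1) closed form start = i*per + min(i, rem), end = start + per + (1 if i < rem else 0), with i = shard_id % num_shards reproducing Python's negative-index wraparound.
import Mathlib
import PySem

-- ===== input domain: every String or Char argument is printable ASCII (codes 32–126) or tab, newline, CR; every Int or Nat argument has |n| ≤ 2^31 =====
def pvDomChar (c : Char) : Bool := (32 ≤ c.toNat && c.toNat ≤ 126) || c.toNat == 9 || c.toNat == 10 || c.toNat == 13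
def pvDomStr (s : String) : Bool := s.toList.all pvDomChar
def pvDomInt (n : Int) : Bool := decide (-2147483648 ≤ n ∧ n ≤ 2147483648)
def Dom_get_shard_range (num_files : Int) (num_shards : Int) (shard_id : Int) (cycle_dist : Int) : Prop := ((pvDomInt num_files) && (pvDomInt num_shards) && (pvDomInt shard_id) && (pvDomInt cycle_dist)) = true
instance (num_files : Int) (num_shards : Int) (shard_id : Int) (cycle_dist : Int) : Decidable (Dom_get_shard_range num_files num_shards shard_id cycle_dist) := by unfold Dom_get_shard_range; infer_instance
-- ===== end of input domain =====

-- B replaces A's O(num_shards) boundary-building loop by the O(1) closed form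
-- start = i*per + min(i, rem); objective: asymptotically faster.

-- ===== PORT A =====
def get_shard_range (num_files : Int) (num_shards : Int) (shard_id : Int) (cycle_dist : Int) : List Int :=
  -- assert shard_id < num_shards  (violations excluded by Pre_)
  let num_files_per_shard := PySem.Int.floordiv num_files num_shards
  let num_files_remainder := PySem.Int.mod num_files num_shards
  let shard_start := (PySem.List.pyRange 1 num_shards 1).foldl
    (fun ss i =>
      if i - 1 < num_files_remainder then
        ss ++ [PySem.List.pyGetD ss (-1) 0 + (num_files_per_shard + 1)]
      else
        ss ++ [PySem.List.pyGetD ss (-1) 0 + num_files_per_shard]) [0]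
  let shard_start := shard_start ++ [num_files]
  let ranges := (PySem.List.pyRange 0 num_shards 1).foldl
    (fun rs i => rs ++ [[PySem.List.pyGetD shard_start i 0,
                         PySem.List.pyGetD shard_start (i + 1) 0]]) ([] : List (List Int))
  PySem.List.pyGetD ranges shard_id []

-- ===== PORT B =====
def get_shard_range_alt (num_files : Int) (num_shards : Int) (shard_id : Int) (cycle_dist : Int) : List Int :=
  let per := PySem.Int.floordiv num_files num_shards
  let rem := PySem.Int.mod num_files num_shards
  let i := PySem.Int.mod shard_id num_shards  -- Python list indexing wraps negative ids
  let start := i * per + min i rem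
  let stop := start + per + (if i < rem then 1 else 0)
  [start, stop]

-- ===== PRECONDITION & SPEC =====
-- Pre_ excludes exactly the inputs where A raises: shard_id ≥ num_shards (AssertionError),
-- num_shards = 0 (ZeroDivisionError), and num_shards < 0 or shard_id < -num_shards (IndexError).
def Pre_get_shard_range (num_files : Int) (num_shards : Int) (shard_id : Int) (cycle_dist : Int) : Prop :=
  0 < num_shards ∧ -num_shards ≤ shard_id ∧ shard_id < num_shards
instance (num_files : Int) (num_shards : Int) (shard_id : Int) (cycle_dist : Int) : Decidable (Pre_get_shard_range num_files num_shards shard_id cycle_dist) := by unfold Pre_get_shard_range; infer_instance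
def pvWitness_get_shard_range : Int × Int × Int × Int := (10, 3, 1, 0)

def Spec_get_shard_range (num_files : Int) (num_shards : Int) (shard_id : Int) (cycle_dist : Int) (out : List Int) : Prop := out = get_shard_range_alt num_files num_shards shard_id cycle_dist
instance (num_files : Int) (num_shards : Int) (shard_id : Int) (cycle_dist : Int) (out : List Int) : Decidable (Spec_get_shard_range num_files num_shards shard_id cycle_dist out) := by unfold Spec_get_shard_range; infer_instance

-- ===== CLAIM (what is proved, stated in full; the proofs are below) =====
def Claim_equal_get_shard_range : Prop := ∀ (num_files : Int) (num_shards : Int) (shard_id : Int) (cycle_dist : Int), Dom_get_shard_range num_files num_shards shard_id cycle_dist → Pre_get_shard_range num_files num_shards shard_id cycle_dist → Spec_get_shard_range num_files num_shards shard_id cycle_dist (get_shard_range num_files num_shards shard_id cycle_dist)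

-- ===== LEMMAS AND PROOFS =====

-- closed form of one shard boundary
def pvBound (per rem i : Int) : Int := i * per + min i rem

-- A's first loop builds exactly the list of closed-form boundaries.
theorem shardStart_foldl (per rem : Int) (hrem : 0 ≤ rem) (n : Int) :
    ∀ (k : Nat) (a : Int), 1 ≤ a → a ≤ n → (n - a).toNat = k →
    (PySem.List.pyRange a n 1).foldl
      (fun ss i =>
        if i - 1 < rem then
          ss ++ [PySem.List.pyGetD ss (-1) 0 + (per + 1)]
        else
          ss ++ [PySem.List.pyGetD ss (-1) 0 + per])
      ((PySem.List.pyRange 0 a 1).map (pvBound per rem))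
    = (PySem.List.pyRange 0 n 1).map (pvBound per rem) := by
  intro k
  induction k with
  | zero =>
      intro a h1 h2 hk
      have ha : a = n := by omega
      subst ha
      rw [PySem.List.pyRange_one_eq_nil (le_refl _)]
      simp
  | succ k ih =>
      intro a h1 h2 hk
      have hlt : a < n := by omega
      rw [PySem.List.pyRange_one_cons hlt, List.foldl_cons]
      have hsplit := PySem.List.pyRange_one_succ_right (show (0:Int) ≤ a - 1 by omega)
      rw [show a - 1 + 1 = a by ring] at hsplit
      have hlast : PySem.List.pyGetD ((PySem.List.pyRange 0 a 1).map (pvBound per rem)) (-1) 0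
          = pvBound per rem (a - 1) := by
        rw [hsplit, List.map_append]
        exact PySem.List.pyGetD_neg_one_append_singleton _ _ _
      have hsucc := PySem.List.pyRange_one_succ_right (show (0:Int) ≤ a by omega)
      have happ : (PySem.List.pyRange 0 a 1).map (pvBound per rem) ++ [pvBound per rem a]
          = (PySem.List.pyRange 0 (a + 1) 1).map (pvBound per rem) := by
        rw [hsucc, List.map_append]; simp
      by_cases hc : a - 1 < rem
      · rw [if_pos hc, hlast]
        have harith : pvBound per rem (a - 1) + (per + 1) = pvBound per rem a := by
          unfold pvBound
          rw [show min (a - 1) rem = a - 1 by omega, show min a rem = a by omega]; ring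
        rw [harith, happ]
        exact ih (a + 1) (by omega) (by omega) (by omega)
      · rw [if_neg hc, hlast]
        have harith : pvBound per rem (a - 1) + per = pvBound per rem a := by
          unfold pvBound
          rw [show min (a - 1) rem = rem by omega, show min a rem = rem by omega]; ring
        rw [harith, happ]
        exact ih (a + 1) (by omega) (by omega) (by omega)

-- A's second loop builds the list of [start, end] pairs from the boundary list.
theorem ranges_foldl (f : Int → Int) (n : Int) :
    ∀ (k : Nat) (a : Int), 0 ≤ a → a ≤ n → (n - a).toNat = k →
    (PySem.List.pyRange a n 1).foldl
      (fun rs i => rs ++ [[PySem.List.pyGetD ((PySem.List.pyRange 0 (n + 1) 1).map f) i 0,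
                           PySem.List.pyGetD ((PySem.List.pyRange 0 (n + 1) 1).map f) (i + 1) 0]])
      ((PySem.List.pyRange 0 a 1).map (fun i => [f i, f (i + 1)]))
    = (PySem.List.pyRange 0 n 1).map (fun i => [f i, f (i + 1)]) := by
  intro k
  induction k with
  | zero =>
      intro a h0 h2 hk
      have ha : a = n := by omega
      subst ha
      rw [PySem.List.pyRange_one_eq_nil (le_refl _)]
      simp
  | succ k ih =>
      intro a h0 h2 hk
      have hlt : a < n := by omega
      rw [PySem.List.pyRange_one_cons hlt, List.foldl_cons]
      rw [PySem.List.pyGetD_map_pyRange_of_nonneg f (n + 1) a 0 h0 (by omega),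
          PySem.List.pyGetD_map_pyRange_of_nonneg f (n + 1) (a + 1) 0 (by omega) (by omega)]
      have happ : (PySem.List.pyRange 0 a 1).map (fun i => [f i, f (i + 1)]) ++ [[f a, f (a + 1)]]
          = (PySem.List.pyRange 0 (a + 1) 1).map (fun i => [f i, f (i + 1)]) := by
        rw [PySem.List.pyRange_one_succ_right (show (0:Int) ≤ a by omega), List.map_append]; rfl
      rw [happ]
      exact ih (a + 1) (by omega) (by omega) (by omega)

-- indexing a range-comprehension list with a possibly negative Python index
theorem pyGetD_map_pyRange_mod (g : Int → List Int) (n i : Int) (d : List Int)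
    (hn : 0 < n) (h1 : -n ≤ i) (h2 : i < n) :
    PySem.List.pyGetD ((PySem.List.pyRange 0 n 1).map g) i d = g (PySem.Int.mod i n) := by
  by_cases hi : 0 ≤ i
  · rw [PySem.List.pyGetD_map_pyRange_of_nonneg g n i d hi h2]
    congr 1
    rw [PySem.Int.mod_eq_emod_of_pos hn]
    exact (Int.emod_eq_of_lt hi h2).symm
  · have hmod : PySem.Int.mod i n = i + n := by
      rw [PySem.Int.mod_eq_emod_of_pos hn, ← Int.add_emod_right i n]
      exact Int.emod_eq_of_lt (by omega) (by omega)
    have hlen : ((PySem.List.pyRange 0 n 1).map g).length = n.toNat := by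
      simp [PySem.List.length_pyRange_one]
    have hneg := PySem.List.pyGetD_neg_natCast ((PySem.List.pyRange 0 n 1).map g) (-i).toNat d
      (by omega) (by rw [hlen]; omega)
    rw [show (-(((-i).toNat : Int))) = i by omega] at hneg
    rw [hneg, List.getElem_map, PySem.List.getElem_pyRange_one]
    congr 1
    rw [hlen, hmod]
    omega

-- the step arithmetic shared by both branch shapes
theorem pvBound_step (per rem j : Int) :
    pvBound per rem (j + 1) = pvBound per rem j + per + (if j < rem then 1 else 0) := by
  unfold pvBound
  by_cases hc : j < rem
  · rw [if_pos hc, show min j rem = j by omega, show min (j + 1) rem = j + 1 by omega]; ring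
  · rw [if_neg hc, show min j rem = rem by omega, show min (j + 1) rem = rem by omega]; ring

-- ===== VERDICT (by name: the statement is the Claim_ definition above) =====
theorem get_shard_range_spec : Claim_equal_get_shard_range := by
  intro num_files num_shards shard_id cycle_dist _ hpre
  obtain ⟨hn, hlo, hhi⟩ := hpre
  simp only [Spec_get_shard_range, get_shard_range, get_shard_range_alt]
  set per := PySem.Int.floordiv num_files num_shards with hper
  set rem := PySem.Int.mod num_files num_shards with hrem
  have hrem0 : 0 ≤ rem := PySem.Int.mod_nonneg _ hn
  have hremn : rem < num_shards := PySem.Int.mod_lt _ hn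
  have h01 : PySem.List.pyRange 0 1 1 = [0] := by decide
  have hinit : ([0] : List Int) = (PySem.List.pyRange 0 1 1).map (pvBound per rem) := by
    rw [h01]; simp [pvBound, show min 0 rem = 0 by omega]
  have hS : (PySem.List.pyRange 1 num_shards 1).foldl
      (fun ss i =>
        if i - 1 < rem then
          ss ++ [PySem.List.pyGetD ss (-1) 0 + (per + 1)]
        else
          ss ++ [PySem.List.pyGetD ss (-1) 0 + per]) [0]
      = (PySem.List.pyRange 0 num_shards 1).map (pvBound per rem) := by
    rw [hinit]
    exact shardStart_foldl per rem hrem0 num_shards (num_shards - 1).toNat 1 (by omega) hn (by omega)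
  have hfn : pvBound per rem num_shards = num_files := by
    have h2 := PySem.Int.floordiv_mul_add_mod num_files num_shards
    rw [← hper, ← hrem] at h2
    unfold pvBound
    rw [show min num_shards rem = rem by omega]
    linear_combination h2
  have hS2 : (PySem.List.pyRange 0 num_shards 1).map (pvBound per rem) ++ [num_files]
      = (PySem.List.pyRange 0 (num_shards + 1) 1).map (pvBound per rem) := by
    rw [PySem.List.pyRange_one_succ_right (show (0:Int) ≤ num_shards by omega),
        List.map_append, ← hfn]
    rfl
  rw [hS, hS2]
  have h00 : PySem.List.pyRange 0 0 1 = ([] : List Int) := by decide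
  have hR : (PySem.List.pyRange 0 num_shards 1).foldl
      (fun rs i => rs ++ [[PySem.List.pyGetD ((PySem.List.pyRange 0 (num_shards + 1) 1).map (pvBound per rem)) i 0,
                           PySem.List.pyGetD ((PySem.List.pyRange 0 (num_shards + 1) 1).map (pvBound per rem)) (i + 1) 0]])
      ([] : List (List Int))
      = (PySem.List.pyRange 0 num_shards 1).map (fun i => [pvBound per rem i, pvBound per rem (i + 1)]) := by
    have hinit2 : ([] : List (List Int))
        = (PySem.List.pyRange 0 0 1).map (fun i => [pvBound per rem i, pvBound per rem (i + 1)]) := by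
      rw [h00]; rfl
    rw [hinit2]
    exact ranges_foldl (pvBound per rem) num_shards num_shards.toNat 0 (le_refl 0) (by omega) (by omega)
  rw [hR, pyGetD_map_pyRange_mod _ num_shards shard_id [] hn hlo hhi]
  have hstep := pvBound_step per rem (PySem.Int.mod shard_id num_shards)
  simp only [pvBound] at hstep
  simp only [pvBound]
  rw [hstep]
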